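-- pv_equiv track=rewrite | github.com/vnborsan/MUSCO | src/educationalfilters/ifilters.py | if1_allows
-- ===== SOURCE A (Python) =====
-- def _parse_moves_str(melodic_string: str):
--     s = str(melodic_string).strip()
--     if not s:
--         return []
--     return list(map(int, s.split()))
--
-- def if1_allows(melodic_string: str) -> bool:
--     """IF1: {0, ±2, ±3, ±4}; ±1 only if isolated (no adjacent ±1)."""
--     try:
--         moves = _parse_moves_str(melodic_string)
--     except Exception:
--         return False
--     allowed_non_m2 = {0, 2, -2, 3, -3, 4, -4}
--     n = len(moves)
--     for i, m in enumerate(moves):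
--         if m in allowed_non_m2:
--             continue
--         if abs(m) == 1:
--             left = (i > 0 and abs(moves[i-1]) == 1)
--             right = (i < n - 1 and abs(moves[i+1]) == 1)
--             if left or right:
--                 return False
--             continue
--         return False
--     return True
-- ===== SOURCE B (Python) =====
-- def _parse_moves_str(melodic_string: str):
--     s = str(melodic_string).strip()
--     if not s:
--         return []
--     return list(map(int, s.split()))
--
-- def if1_allows(melodic_string: str) -> bool:
--     """IF1: {0, +/-2, +/-3, +/-4}; +/-1 only if isolated (no adjacent +/-1)."""
--     try:
--         moves = _parse_moves_str(melodic_string)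
--     except Exception:
--         return False
--     if any(abs(m) > 4 for m in moves):
--         return False
--     if any(abs(a) == 1 and abs(b) == 1 for a, b in zip(moves, moves[1:])):
--         return False
--     return True
-- ===== Notes on version B (the rewrite author's own statement) =====
-- stated objective: simpler
-- what changed: Replaced the single indexed loop with inline left/right neighbor lookups by two independent any() scans: one for out-of-range moves (|m|>4) and one over zipped consecutive pairs for adjacent +/-1s.
import Mathlib
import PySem

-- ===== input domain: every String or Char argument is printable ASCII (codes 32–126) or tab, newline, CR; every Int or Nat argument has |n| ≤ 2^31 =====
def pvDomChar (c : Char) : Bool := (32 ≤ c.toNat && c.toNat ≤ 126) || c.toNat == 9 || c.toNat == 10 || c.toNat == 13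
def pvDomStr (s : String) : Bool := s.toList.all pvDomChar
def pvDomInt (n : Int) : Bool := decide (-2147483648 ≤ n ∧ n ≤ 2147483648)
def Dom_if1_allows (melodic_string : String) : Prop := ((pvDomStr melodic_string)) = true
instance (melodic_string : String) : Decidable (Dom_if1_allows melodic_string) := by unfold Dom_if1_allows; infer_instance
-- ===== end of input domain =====

-- B replaces A's single indexed loop (with inline left/right neighbour lookups) by two
-- independent any-scans: one for out-of-range moves, one over zipped consecutive pairs
-- for adjacent ±1s (objective: simpler).

-- ===== PORT A =====
-- _parse_moves_str, shared verbatim by A and B; map(int, …) raising ValueError = none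
def parseMovesStr (melodic_string : String) : Option (List Int) :=
  let s := PySem.Str.strip melodic_string
  if s = "" then some []
  else (PySem.Str.split₀ s).mapM PySem.Int.ofStr?

def allowedNonM2 : PySem.Set Int := PySem.Set.ofList [0, 2, -2, 3, -3, 4, -4]

-- the 'for i, m in enumerate(moves)' loop, as structural recursion on the index
def if1Loop (moves : List Int) (n : Nat) (i : Nat) : Bool :=
  if _h : i < n then
    let m := moves.getD i 0
    if PySem.Set.contains allowedNonM2 m then if1Loop moves n (i + 1)
    else if m.natAbs = 1 then
      let left := decide (0 < i) && ((moves.getD (i - 1) 0).natAbs == 1)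
      let right := decide (i < n - 1) && ((moves.getD (i + 1) 0).natAbs == 1)
      if left || right then false else if1Loop moves n (i + 1)
    else false
  else true
termination_by n - i

def if1_allows (melodic_string : String) : Bool :=
  match parseMovesStr melodic_string with
  | none => false        -- try/except: int() raised
  | some moves => if1Loop moves moves.length 0

-- ===== PORT B =====
def if1_allows_alt (melodic_string : String) : Bool :=
  match parseMovesStr melodic_string with
  | none => false        -- try/except: int() raised
  | some moves =>
    if moves.any (fun m => 4 < m.natAbs) then false
    else if ((moves.zip (PySem.List.slice moves (some 1) none)).any
              (fun p => p.1.natAbs == 1 && p.2.natAbs == 1)) then false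
    else true

-- ===== PRECONDITION & SPEC =====
def Spec_if1_allows (melodic_string : String) (out : Bool) : Prop := out = if1_allows_alt melodic_string
instance (melodic_string : String) (out : Bool) : Decidable (Spec_if1_allows melodic_string out) := by unfold Spec_if1_allows; infer_instance

-- ===== CLAIM (what is proved, stated in full; the proofs are below) =====
def Claim_equal_if1_allows : Prop := ∀ (melodic_string : String), Dom_if1_allows melodic_string → Spec_if1_allows melodic_string (if1_allows melodic_string)

-- ===== LEMMAS AND PROOFS =====

-- head-of-list is a ±1 move
def headOne : List Int → Bool
  | [] => false
  | a :: _ => a.natAbs == 1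

-- adjacent ±1 pair somewhere in the list
def adj : List Int → Bool
  | [] => false
  | a :: l => (a.natAbs == 1 && headOne l) || adj l

theorem zip_any_eq_adj (ms : List Int) :
    ((ms.zip (ms.drop 1)).any (fun p => p.1.natAbs == 1 && p.2.natAbs == 1)) = adj ms := by
  induction ms with
  | nil => rfl
  | cons a l ih =>
    cases l with
    | nil => simp [adj, headOne]
    | cons b r =>
      simp only [List.drop_one, List.tail_cons] at ih ⊢
      rw [List.zip_cons_cons, List.any_cons, ih]
      simp [adj, headOne]

theorem if1Loop_spec (moves : List Int) (i : Nat) :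
    if1Loop moves moves.length i =
      (!((decide (0 < i) && ((moves.getD (i - 1) 0).natAbs == 1)) && headOne (moves.drop i)) &&
       !((moves.drop i).any (fun m => 4 < m.natAbs)) && !(adj (moves.drop i))) := by
  by_cases h : i < moves.length
  · rw [if1Loop]
    have hdrop : moves.drop i = moves[i] :: moves.drop (i + 1) := List.drop_eq_getElem_cons h
    have hgetD : moves.getD i 0 = moves[i] := List.getD_eq_getElem moves 0 h
    have hright : (decide (i < moves.length - 1) && ((moves.getD (i + 1) 0).natAbs == 1))
        = headOne (moves.drop (i + 1)) := by
      by_cases h2 : i + 1 < moves.length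
      · have hd2 : moves.drop (i + 1) = moves[i + 1] :: moves.drop (i + 2) :=
          List.drop_eq_getElem_cons h2
        rw [hd2, List.getD_eq_getElem moves 0 h2]
        simp only [headOne]
        have : i < moves.length - 1 := by omega
        simp [this]
      · have hnil : moves.drop (i + 1) = [] := List.drop_eq_nil_of_le (by omega)
        rw [hnil]
        have : ¬ i < moves.length - 1 := by omega
        simp [this, headOne]
    have hgd : moves.getD (i + 1 - 1) 0 = moves[i] := by simpa using hgetD
    have ih := if1Loop_spec moves (i + 1)
    rw [hgd] at ih
    simp only [Nat.zero_lt_succ, decide_true, Bool.true_and] at ih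
    have hHead : headOne (moves[i] :: moves.drop (i + 1)) = (moves[i].natAbs == 1) := rfl
    have hAdj : adj (moves[i] :: moves.drop (i + 1)) =
        ((moves[i].natAbs == 1 && headOne (moves.drop (i + 1))) || adj (moves.drop (i + 1))) := rfl
    simp only [h, dif_pos, hgetD]
    by_cases hmem : PySem.Set.contains allowedNonM2 moves[i] = true
    · -- m ∈ {0, ±2, ±3, ±4}
      have habs : moves[i].natAbs = 0 ∨ moves[i].natAbs = 2 ∨ moves[i].natAbs = 3 ∨
          moves[i].natAbs = 4 := by
        rcases (by simpa [allowedNonM2, PySem.Set.contains, PySem.Set.ofList, List.foldl,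
            PySem.Set.add] using hmem : moves[i] = 0 ∨ moves[i] = 2 ∨ moves[i] = -2 ∨
            moves[i] = 3 ∨ moves[i] = -3 ∨ moves[i] = 4 ∨ moves[i] = -4) with
          h' | h' | h' | h' | h' | h' | h' <;> simp [h']
      have hne1 : (moves[i].natAbs == 1) = false := by
        rcases habs with h' | h' | h' | h' <;> simp [h']
      have hle4 : ¬ (4 < moves[i].natAbs) := by
        rcases habs with h' | h' | h' | h' <;> simp [h']
      rw [hmem, if_pos rfl, ih, hdrop, hHead, hAdj, List.any_cons]
      simp [hne1, hle4]
    · rw [Bool.not_eq_true] at hmem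
      rw [hmem]
      simp only [Bool.false_eq_true, if_false]
      by_cases h1 : moves[i].natAbs = 1
      · simp only [h1]
        rw [hright]
        by_cases hl : (decide (0 < i) && ((moves.getD (i - 1) 0).natAbs == 1)) = true
        · -- left neighbour is ±1: both sides are false
          rw [hl]
          simp only [Bool.true_or]
          rw [hdrop, hHead]
          simp [h1]
        · rw [Bool.not_eq_true] at hl
          rw [hl]
          simp only [Bool.false_or]
          by_cases hr : headOne (moves.drop (i + 1)) = true
          · -- right neighbour is ±1: both sides are false
            rw [hr]
            rw [hdrop, hAdj]
            simp [h1, hr]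
          · rw [Bool.not_eq_true] at hr
            rw [hr]
            simp only [Bool.false_eq_true, if_false]
            rw [ih, hdrop, hHead, hAdj, List.any_cons]
            simp [h1, hr]
      · -- not allowed and |m| ≠ 1 ⇒ |m| > 4: both sides false
        have hgt : 4 < moves[i].natAbs := by
          by_contra hle
          apply absurd hmem
          simp only [Bool.not_eq_false]
          have : moves[i] = 0 ∨ moves[i] = 2 ∨ moves[i] = -2 ∨ moves[i] = 3 ∨
              moves[i] = -3 ∨ moves[i] = 4 ∨ moves[i] = -4 := by omega
          rcases this with h' | h' | h' | h' | h' | h' | h' <;>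
            simp [h', allowedNonM2, PySem.Set.contains, PySem.Set.ofList, List.foldl, PySem.Set.add]
        simp only [h1, if_false]
        rw [hdrop, List.any_cons]
        simp [hgt]
  · have hnil : moves.drop i = [] := List.drop_eq_nil_of_le (by omega)
    rw [if1Loop]
    simp [h, hnil, headOne, adj]
termination_by moves.length - i

-- ===== VERDICT (by name: the statement is the Claim_ definition above) =====
theorem if1_allows_spec : Claim_equal_if1_allows := by
  intro s _hdom
  unfold Spec_if1_allows if1_allows if1_allows_alt
  cases hp : parseMovesStr s with
  | none => rfl
  | some moves =>
    have h0 := if1Loop_spec moves 0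
    simp only [List.drop_zero, Nat.lt_irrefl, decide_false, Bool.false_and,
      Bool.not_false, Bool.true_and] at h0
    have hs : PySem.List.slice moves (some 1) none = moves.drop 1 := by
      simpa using PySem.List.slice_from moves (a := 1) (by omega)
    simp only [hs, zip_any_eq_adj, h0]
    cases (moves.any fun m => decide (4 < m.natAbs)) <;> cases adj moves <;> simp
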